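-- pv_equiv track=rewrite | github.com/Cosgraf/KOA_automation | macros.py | prepare_names
-- ===== SOURCE A (Python) =====
-- def prepare_names(names):
--     dict_names = {}
--     for name in names:
--         identical_char = 0
--         for name_to_test in names:
--             identical_char_tmp = 0
--             if name != name_to_test:
--                 min_len = min(len(name), len(name_to_test))
--                 for i in range(min_len):
--                     char1, char2 = name[i], name_to_test[i]
--                     if char1 == char2:
--                         identical_char_tmp += 1
--                     else:
--                         break
--             if identical_char_tmp > identical_char:
--                 identical_char = identical_char_tmp
--         char_to_test = identical_char + 1
--         dict_names[name] = char_to_test - 1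
--     return dict_names
-- ===== SOURCE B (Python) =====
-- def prepare_names(names):
--     # Sort the distinct names once; each name's best common prefix with any
--     # other name is attained at a sorted neighbour.
--     uniq = list(dict.fromkeys(names))
--     s = sorted(uniq)
--     pos = {name: i for i, name in enumerate(s)}
--
--     def _cp(a, b):
--         n = min(len(a), len(b))
--         i = 0
--         while i < n and a[i] == b[i]:
--             i += 1
--         return i
--
--     def _best(name):
--         i = pos[name]
--         v = _cp(name, s[i - 1]) if i > 0 else 0
--         if i + 1 < len(s):
--             w = _cp(name, s[i + 1])
--             if w > v:
--                 v = w
--         return v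
--
--     return {name: _best(name) for name in uniq}
-- ===== Notes on version B (the rewrite author's own statement) =====
-- stated objective: faster
-- what changed: Instead of comparing every name with every other name (quadratic in the number of names), B sorts the distinct names once and takes each name's maximal common prefix with its two sorted neighbours, which provably attains the maximum over all other names.
import Mathlib
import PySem

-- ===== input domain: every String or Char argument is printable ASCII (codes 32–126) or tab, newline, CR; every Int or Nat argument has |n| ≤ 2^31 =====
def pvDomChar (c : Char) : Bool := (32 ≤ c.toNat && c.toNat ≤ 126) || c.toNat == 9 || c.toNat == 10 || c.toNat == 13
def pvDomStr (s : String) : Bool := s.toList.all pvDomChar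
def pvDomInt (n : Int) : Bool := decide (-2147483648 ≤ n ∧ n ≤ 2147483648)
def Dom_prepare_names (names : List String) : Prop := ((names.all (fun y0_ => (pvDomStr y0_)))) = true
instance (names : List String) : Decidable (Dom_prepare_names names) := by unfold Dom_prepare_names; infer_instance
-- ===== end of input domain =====

-- B sorts the distinct names once and reads each name's maximal shared prefix off its two
-- sorted neighbours instead of comparing every name with every other name (objective: faster).

-- ===== PORT A =====
-- A's inner character loop: 'for i in range(min_len): … if char1 == char2: tmp += 1 else: break',
-- transliterated as recursion on the remaining iteration count (i is always in range, so getD is exact)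
def pvARange (name t : List Char) (i fuel : Nat) (tmp : Int) : Int :=
  match fuel with
  | 0 => tmp
  | f + 1 =>
    let char1 := name.getD i ' '
    let char2 := t.getD i ' '
    if char1 = char2 then pvARange name t (i + 1) f (tmp + 1) else tmp

def prepare_names (names : List String) : List (String × Int) :=
  (names.foldl (fun dict_names name =>
      let identical_char := names.foldl (fun identical_char name_to_test =>
        let identical_char_tmp : Int :=
          if name ≠ name_to_test then
            pvARange name.toList name_to_test.toList 0
              (min name.toList.length name_to_test.toList.length) 0
          else 0
        if identical_char_tmp > identical_char then identical_char_tmp else identical_char)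
        (0 : Int)
      let char_to_test := identical_char + 1
      PySem.Dict.insert dict_names name (char_to_test - 1)) PySem.Dict.empty).items

-- ===== PORT B =====
-- Source B's _cp: the while loop walking both strings in step while characters agree
def pvCp : List Char → List Char → Int
  | a :: as, b :: bs => if a = b then 1 + pvCp as bs else 0
  | _, _ => 0

-- Source B's _best: the answer for `name` from its neighbours in the sorted list s
-- (pos[name] never misses and the two indexings are always in range, so getD 0 / pyGetD are exact)
def pvBest (s : List String) (pos : PySem.Dict String Int) (name : String) : Int :=
  let i := pos.getD name 0
  let v := if 0 < i then pvCp name.toList (PySem.List.pyGetD s (i - 1) "").toList else 0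
  if i + 1 < (s.length : Int) then
    let w := pvCp name.toList (PySem.List.pyGetD s (i + 1) "").toList
    if w > v then w else v
  else v

def prepare_names_alt (names : List String) : List (String × Int) :=
  let uniq := PySem.List.dedup names
  let s := PySem.List.sorted uniq (fun x => x) false
  let pos : PySem.Dict String Int :=
    PySem.Dict.mk ((PySem.List.enumerate s).map (fun p => (p.2, p.1)))
  -- the final dict comprehension: uniq has no duplicates, so its items are exactly this map
  uniq.map (fun name => (name, pvBest s pos name))

-- ===== PRECONDITION & SPEC =====
def Spec_prepare_names (names : List String) (out : List (String × Int)) : Prop :=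
  out = prepare_names_alt names
instance (names : List String) (out : List (String × Int)) : Decidable (Spec_prepare_names names out) := by
  unfold Spec_prepare_names; infer_instance

-- ===== CLAIM =====
def Claim_equal_prepare_names : Prop :=
  ∀ (names : List String), Dom_prepare_names names → Spec_prepare_names names (prepare_names names)

-- ===== LEMMAS AND PROOFS =====

-- proof-side helper: the candidate value A's inner loop contributes for rival t
def pvGA (name t : String) : Int := if name ≠ t then pvCp name.toList t.toList else 0

theorem pvCp_nonneg (a b : List Char) : 0 ≤ pvCp a b := by
  induction a generalizing b with
  | nil => simp [pvCp]
  | cons x xs ih =>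
    cases b with
    | nil => simp [pvCp]
    | cons y ys =>
      simp only [pvCp]
      split
      · have := ih ys; omega
      · omega

theorem pvCp_comm (a b : List Char) : pvCp a b = pvCp b a := by
  induction a generalizing b with
  | nil => cases b <;> simp [pvCp]
  | cons x xs ih =>
    cases b with
    | nil => simp [pvCp]
    | cons y ys =>
      simp only [pvCp]
      rcases eq_or_ne x y with h | h
      · subst h; simp [ih ys]
      · simp [h, Ne.symm h]

theorem pvARange_drop (fuel : Nat) :
    ∀ (a b : List Char) (i : Nat) (tmp : Int),
      fuel = min (a.length - i) (b.length - i) →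
      pvARange a b i fuel tmp = tmp + pvCp (a.drop i) (b.drop i) := by
  induction fuel with
  | zero =>
    intro a b i tmp h
    have : a.length ≤ i ∨ b.length ≤ i := by omega
    rcases this with h' | h'
    · rw [List.drop_eq_nil_of_le h']; simp [pvARange, pvCp]
    · rw [List.drop_eq_nil_of_le (as := b) h']
      simp only [pvARange]
      cases a.drop i <;> simp [pvCp]
  | succ f ih =>
    intro a b i tmp h
    have ha : i < a.length := by omega
    have hb : i < b.length := by omega
    have hda : a.drop i = a[i] :: a.drop (i + 1) := List.drop_eq_getElem_cons ha
    have hdb : b.drop i = b[i] :: b.drop (i + 1) := List.drop_eq_getElem_cons hb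
    simp only [pvARange, List.getD_eq_getElem a ' ' ha, List.getD_eq_getElem b ' ' hb]
    rw [hda, hdb]
    by_cases hc : a[i] = b[i]
    · rw [if_pos hc, ih a b (i + 1) (tmp + 1) (by omega)]
      simp only [pvCp, if_pos hc]
      ring
    · simp [hc, pvCp]

theorem pvARange_eq (a b : List Char) :
    pvARange a b 0 (min a.length b.length) 0 = pvCp a b := by
  have := pvARange_drop (min a.length b.length) a b 0 0 (by omega)
  simpa using this

theorem pvCp_lex_mono {a b : List Char} (h1 : List.Lex (· < ·) a b) :
    ∀ c : List Char, List.Lex (· < ·) b c →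
      pvCp a c ≤ pvCp b c ∧ pvCp a c ≤ pvCp a b := by
  induction h1 with
  | @nil y bs =>
    intro c hc
    constructor
    · have h0 : pvCp ([] : List Char) c = 0 := by cases c <;> simp [pvCp]
      rw [h0]; exact pvCp_nonneg _ _
    · have h0 : pvCp ([] : List Char) c = 0 := by cases c <;> simp [pvCp]
      have h0' : pvCp ([] : List Char) (y :: bs) = 0 := by simp [pvCp]
      rw [h0, h0']
  | @cons x as bs h ih =>
    intro c hc
    cases hc with
    | @cons _ _ cs hc' =>
      have h3 := ih cs hc'
      simp [pvCp]
      omega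
    | @rel _ _ z cs hr =>
      have hxz : x ≠ z := ne_of_lt hr
      have h0 : pvCp (x :: as) (z :: cs) = 0 := by simp [pvCp, hxz]
      constructor
      · rw [h0]; exact pvCp_nonneg _ _
      · rw [h0]; exact pvCp_nonneg _ _
  | @rel x as y bs hxy =>
    intro c hc
    have hxy' : x ≠ y := ne_of_lt hxy
    have hb0 : pvCp (x :: as) (y :: bs) = 0 := by simp [pvCp, hxy']
    cases hc with
    | @cons _ _ cs hc' =>
      have h0 : pvCp (x :: as) (y :: cs) = 0 := by simp [pvCp, hxy']
      rw [h0]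
      exact ⟨pvCp_nonneg _ _, by rw [hb0]⟩
    | @rel _ _ z cs hr =>
      have hxz : x ≠ z := ne_of_lt (lt_trans hxy hr)
      have h0 : pvCp (x :: as) (z :: cs) = 0 := by simp [pvCp, hxz]
      rw [h0]
      exact ⟨pvCp_nonneg _ _, by rw [hb0]⟩

theorem pv_str_lt_lex {x y : String} (h : x < y) : List.Lex (· < ·) x.toList y.toList := by
  rw [String.lt_iff_toList_lt] at h
  exact (List.lt_iff_lex_lt _ _).mp h

theorem pv_items_foldl_insert (g : String → Int) :
    ∀ (l ks : List String), ks.Nodup →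
      (l.foldl (fun d n => PySem.Dict.insert d n (g n))
          (PySem.Dict.mk (ks.map (fun k => (k, g k))))).items
        = (PySem.Set.update ks l).map (fun k => (k, g k)) := by
  intro l
  induction l with
  | nil => intro ks hk; simp [PySem.Set.update]
  | cons n l ih =>
    intro ks hk
    simp only [List.foldl_cons]
    by_cases hmem : n ∈ ks
    · have hc : (PySem.Dict.mk (ks.map (fun k => (k, g k)))).contains n = true := by
        rw [PySem.Dict.contains_mk]
        simp [List.any_map, Function.comp, List.any_eq_true]
        exact hmem
      have hit := PySem.Dict.items_insert_of_contains
        (PySem.Dict.mk (ks.map (fun k => (k, g k)))) (g n) hc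
      have hitems : (PySem.Dict.insert (PySem.Dict.mk (ks.map (fun k => (k, g k)))) n (g n)).items
          = ks.map (fun k => (k, g k)) := by
        rw [hit, List.map_map]
        apply List.map_congr_left
        intro k hkmem
        by_cases hkn : k = n
        · subst hkn; simp
        · simp [Function.comp, hkn]
      have h1 : (PySem.Dict.insert (PySem.Dict.mk (ks.map (fun k => (k, g k)))) n (g n))
          = PySem.Dict.mk (ks.map (fun k => (k, g k))) := by
        conv_lhs => rw [show (PySem.Dict.insert (PySem.Dict.mk (ks.map (fun k => (k, g k)))) n (g n))
          = PySem.Dict.mk ((PySem.Dict.insert (PySem.Dict.mk (ks.map (fun k => (k, g k)))) n (g n)).items) from rfl]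
        rw [hitems]
      rw [h1, ih ks hk, PySem.Set.update_cons, PySem.Set.add_of_mem hmem]
    · have hc : (PySem.Dict.mk (ks.map (fun k => (k, g k)))).contains n = false := by
        rw [PySem.Dict.contains_mk]
        simp [List.any_map, Function.comp]
        exact fun x hx h => hmem (h ▸ hx)
      have hit := PySem.Dict.items_insert_of_not_contains
        (PySem.Dict.mk (ks.map (fun k => (k, g k)))) (g n) hc
      have h1 : (PySem.Dict.insert (PySem.Dict.mk (ks.map (fun k => (k, g k)))) n (g n))
          = PySem.Dict.mk ((ks ++ [n]).map (fun k => (k, g k))) := by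
        conv_lhs => rw [show (PySem.Dict.insert (PySem.Dict.mk (ks.map (fun k => (k, g k)))) n (g n))
          = PySem.Dict.mk ((PySem.Dict.insert (PySem.Dict.mk (ks.map (fun k => (k, g k)))) n (g n)).items) from rfl]
        rw [hit]; simp
      rw [h1, ih (ks ++ [n]) (by simp [List.nodup_append, hk]; exact fun a ha h => hmem (h ▸ ha)),
        PySem.Set.update_cons, PySem.Set.add_of_not_mem hmem]

theorem pv_main (names : List String) (name : String) (hname : name ∈ names) :
    names.foldl (fun ic t => max ic (pvGA name t)) 0
      = pvBest (PySem.List.sorted (PySem.List.dedup names) (fun x => x) false)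
          (PySem.Dict.mk ((PySem.List.enumerate (PySem.List.sorted (PySem.List.dedup names) (fun x => x) false)).map (fun p => (p.2, p.1))))
          name := by
  set s := PySem.List.sorted (PySem.List.dedup names) (fun x => x) false with hs
  set pos := PySem.Dict.mk ((PySem.List.enumerate s).map (fun p => (p.2, p.1))) with hposdef
  -- sortedness / membership facts
  have hps : s.Pairwise (· < ·) := by
    rw [hs, PySem.List.dedup_eq_ofList]
    exact PySem.List.sorted_ofList_pairwise_lt names
  have hnodup : s.Nodup := hps.imp ne_of_lt
  have hmem_s : ∀ t, t ∈ s ↔ t ∈ names := by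
    intro t
    rw [hs, PySem.List.mem_sorted, PySem.List.dedup_eq_ofList, PySem.Set.mem_ofList]
  have hlt : ∀ (p q : Nat) (hp : p < q) (hq : q < s.length), s[p]'(by omega) < s[q]'hq :=
    fun p q hp hq => (List.pairwise_iff_getElem.mp hps) p q (by omega) hq hp
  -- name's index in s
  obtain ⟨k, hk, hsk⟩ := List.mem_iff_getElem.mp ((hmem_s name).mpr hname)
  -- pos.getD name 0 = k
  have hkeys : pos.keys = s := by
    rw [hposdef, PySem.Dict.keys_mk, List.map_map]
    have : ((fun x => x.1) ∘ fun (p : Int × String) => (p.2, p.1)) = fun p => p.2 := rfl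
    rw [this, PySem.List.map_snd_enumerate]
  have hitem : (name, (k : Int)) ∈ pos.items := by
    rw [hposdef]
    have h1 : ((k : Int), name) ∈ PySem.List.enumerate s 0 := by
      rw [PySem.List.mem_enumerate_iff]
      exact ⟨k, hk, by simp [hsk]⟩
    exact List.mem_map.mpr ⟨((k : Int), name), h1, rfl⟩
  have hpos : pos.getD name 0 = (k : Int) :=
    PySem.Dict.getD_of_mem_items _ hitem (by rw [hkeys]; exact hnodup) 0
  -- A-side: the running maximum X
  set X := names.foldl (fun ic t => max ic (pvGA name t)) 0 with hXdef
  have hXfacts := PySem.List.le_foldl_max_int names (pvGA name) 0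
  have hX0 : 0 ≤ X := hXfacts.1
  have hXub : ∀ t ∈ names, pvGA name t ≤ X := hXfacts.2
  have hXmem : X = 0 ∨ ∃ t, t ∈ names ∧ t ≠ name ∧ pvCp name.toList t.toList = X := by
    have h := PySem.List.foldl_max_mem (names.map (pvGA name)) 0
    rw [List.foldl_map] at h
    rcases h with h | h
    · left; exact h
    · rcases List.mem_map.mp h with ⟨t, ht, hgt⟩
      have hgt' : pvGA name t = X := hgt
      by_cases hne : name = t
      · left; rw [pvGA, if_neg (by simp [hne])] at hgt'; exact hgt'.symm
      · right
        rw [pvGA, if_pos hne] at hgt'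
        exact ⟨t, ht, fun he => hne he.symm, hgt'⟩
  -- B-side candidates
  set L := pvCp name.toList (s.getD (k - 1) "").toList with hLdef
  set R := pvCp name.toList (s.getD (k + 1) "").toList with hRdef
  have hL0 : 0 ≤ L := pvCp_nonneg _ _
  have hR0 : 0 ≤ R := pvCp_nonneg _ _
  -- every rival's common prefix is bounded by a neighbour's
  have hNb : ∀ t ∈ s, t ≠ name →
      (0 < k ∧ pvCp name.toList t.toList ≤ L) ∨ (k + 1 < s.length ∧ pvCp name.toList t.toList ≤ R) := by
    intro t hts htne
    obtain ⟨j, hj, hsj⟩ := List.mem_iff_getElem.mp hts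
    have hjk : j ≠ k := by intro h; subst h; rw [hsj] at hsk; exact htne hsk
    rcases Nat.lt_or_ge j k with hjlt | hge
    · left
      refine ⟨by omega, ?_⟩
      have hgetD : s.getD (k - 1) "" = s[k - 1]'(by omega) := List.getD_eq_getElem s "" (by omega)
      by_cases hjk1 : j = k - 1
      · subst hjk1; rw [hLdef, hgetD, ← hsj]
      · have h1 : s[j] < s[k - 1]'(by omega) := hlt j (k - 1) (by omega) (by omega)
        have h2 : s[k - 1]'(by omega) < name := by have := hlt (k - 1) k (by omega) hk; rwa [hsk] at this
        have hm := pvCp_lex_mono (pv_str_lt_lex h1) name.toList (pv_str_lt_lex h2)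
        rw [pvCp_comm name.toList t.toList, ← hsj, hLdef, hgetD,
          pvCp_comm name.toList]
        exact hm.1
    · have hklt : k < j := by omega
      right
      refine ⟨by omega, ?_⟩
      have hgetD : s.getD (k + 1) "" = s[k + 1]'(by omega) := List.getD_eq_getElem s "" (by omega)
      by_cases hjk1 : j = k + 1
      · subst hjk1; rw [hRdef, hgetD, ← hsj]
      · have h1 : name < s[k + 1]'(by omega) := by have := hlt k (k + 1) (by omega) (by omega); rwa [hsk] at this
        have h2 : s[k + 1]'(by omega) < s[j] := hlt (k + 1) j (by omega) hj
        have hm := pvCp_lex_mono (pv_str_lt_lex h1) (s[j]).toList (pv_str_lt_lex h2)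
        rw [← hsj, hRdef, hgetD]
        exact hm.2
  -- neighbours are rivals, so L and R are below X
  have hLX : 0 < k → L ≤ X := by
    intro h0
    have hgetD : s.getD (k - 1) "" = s[k - 1]'(by omega) := List.getD_eq_getElem s "" (by omega)
    have hne : name ≠ s[k - 1]'(by omega) := by
      have := hlt (k - 1) k (by omega) hk; rw [hsk] at this; exact (ne_of_lt this).symm
    have := hXub (s[k - 1]'(by omega)) ((hmem_s _).mp (List.getElem_mem _))
    rw [pvGA, if_pos hne] at this
    rw [hLdef, hgetD]; exact this
  have hRX : k + 1 < s.length → R ≤ X := by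
    intro h0
    have hgetD : s.getD (k + 1) "" = s[k + 1]'(by omega) := List.getD_eq_getElem s "" (by omega)
    have hne : name ≠ s[k + 1]'(by omega) := by
      have := hlt k (k + 1) (by omega) (by omega); rw [hsk] at this; exact ne_of_lt this
    have := hXub (s[k + 1]'(by omega)) ((hmem_s _).mp (List.getElem_mem _))
    rw [pvGA, if_pos hne] at this
    rw [hRdef, hgetD]; exact this
  -- X is below the best neighbour
  have hXle : X = 0 ∨ (0 < k ∧ X ≤ L) ∨ (k + 1 < s.length ∧ X ≤ R) := by
    rcases hXmem with h | ⟨t, ht, htne, hcp⟩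
    · left; exact h
    · rcases hNb t ((hmem_s t).mpr ht) htne with ⟨h1, h2⟩ | ⟨h1, h2⟩
      · right; left; exact ⟨h1, by omega⟩
      · right; right; exact ⟨h1, by omega⟩
  -- pyGetD agrees with getD on the two in-range indices
  have hpgL : 0 < k → PySem.List.pyGetD s ((k : Int) - 1) "" = s.getD (k - 1) "" := by
    intro h0
    rw [PySem.List.pyGetD_eq_getElem s "" (by omega) (by omega),
      List.getD_eq_getElem s "" (by omega)]
    simp only [show ((k : Int) - 1).toNat = k - 1 from by omega]
  have hpgR : k + 1 < s.length → PySem.List.pyGetD s ((k : Int) + 1) "" = s.getD (k + 1) "" := by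
    intro h0
    rw [PySem.List.pyGetD_eq_getElem s "" (by omega) (by omega),
      List.getD_eq_getElem s "" (by omega)]
    simp only [show ((k : Int) + 1).toNat = k + 1 from by omega]
  -- unfold pvBest and close each branch
  simp only [pvBest, hpos]
  by_cases h1 : 0 < k
  · have h1' : (0 : Int) < (k : Int) := by exact_mod_cast h1
    by_cases h2 : k + 1 < s.length
    · have h2' : (k : Int) + 1 < (s.length : Int) := by omega
      simp only [hpgL h1, hpgR h2, if_pos h1', if_pos h2']
      rw [← hLdef, ← hRdef]
      have hL' := hLX h1
      have hR' := hRX h2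
      split_ifs with hw <;> (rcases hXle with h | ⟨_, h⟩ | ⟨_, h⟩ <;> omega)
    · have h2' : ¬((k : Int) + 1 < (s.length : Int)) := by omega
      simp only [hpgL h1, if_pos h1', if_neg h2']
      rw [← hLdef]
      have hL' := hLX h1
      rcases hXle with h | ⟨_, h⟩ | ⟨hh, h⟩ <;> omega
  · have h1' : ¬((0 : Int) < (k : Int)) := by exact_mod_cast h1
    by_cases h2 : k + 1 < s.length
    · have h2' : (k : Int) + 1 < (s.length : Int) := by omega
      simp only [hpgR h2, if_neg h1', if_pos h2']
      rw [← hRdef]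
      have hR' := hRX h2
      split_ifs with hw <;> (rcases hXle with h | ⟨hh, h⟩ | ⟨_, h⟩ <;> omega)
    · have h2' : ¬((k : Int) + 1 < (s.length : Int)) := by omega
      simp only [if_neg h1', if_neg h2']
      rcases hXle with h | ⟨hh, h⟩ | ⟨hh, h⟩ <;> omega

theorem prepare_names_eq_map (names : List String) :
    prepare_names names
      = (PySem.List.dedup names).map (fun n =>
          (n, (names.foldl (fun identical_char name_to_test =>
                let identical_char_tmp : Int :=
                  if n ≠ name_to_test then
                    pvARange n.toList name_to_test.toList 0
                      (min n.toList.length name_to_test.toList.length) 0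
                  else 0
                if identical_char_tmp > identical_char then identical_char_tmp else identical_char)
              (0 : Int)) + 1 - 1)) := by
  have hA : prepare_names names
      = (names.foldl (fun d n => PySem.Dict.insert d n
            ((names.foldl (fun identical_char name_to_test =>
                let identical_char_tmp : Int :=
                  if n ≠ name_to_test then
                    pvARange n.toList name_to_test.toList 0
                      (min n.toList.length name_to_test.toList.length) 0
                  else 0
                if identical_char_tmp > identical_char then identical_char_tmp else identical_char)
              (0 : Int)) + 1 - 1))
          (PySem.Dict.mk (([] : List String).map (fun k => (k,
            (names.foldl (fun identical_char name_to_test =>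
                let identical_char_tmp : Int :=
                  if k ≠ name_to_test then
                    pvARange k.toList name_to_test.toList 0
                      (min k.toList.length name_to_test.toList.length) 0
                  else 0
                if identical_char_tmp > identical_char then identical_char_tmp else identical_char)
              (0 : Int)) + 1 - 1))))).items := rfl
  rw [hA, pv_items_foldl_insert _ names [] List.nodup_nil]
  rw [PySem.Set.update_nil_left, ← PySem.List.dedup_eq_ofList]

-- ===== VERDICT =====
theorem prepare_names_spec : Claim_equal_prepare_names := by
  unfold Claim_equal_prepare_names
  intro names _
  unfold Spec_prepare_names prepare_names_alt
  rw [prepare_names_eq_map]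
  apply List.map_congr_left
  intro n hn
  have hmemn : n ∈ names := by
    rw [PySem.List.dedup_eq_ofList, PySem.Set.mem_ofList] at hn; exact hn
  have hfun : (fun (identical_char : Int) (name_to_test : String) =>
        let identical_char_tmp : Int :=
          if n ≠ name_to_test then
            pvARange n.toList name_to_test.toList 0
              (min n.toList.length name_to_test.toList.length) 0
          else 0
        if identical_char_tmp > identical_char then identical_char_tmp else identical_char)
      = (fun ic t => max ic (pvGA n t)) := by
    funext ic t
    simp only [pvGA]
    by_cases h : n ≠ t
    · rw [if_pos h, if_pos h, pvARange_eq]; omega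
    · rw [if_neg h, if_neg h]; omega
  rw [hfun]
  have hmain := pv_main names n hmemn
  simp only [Prod.mk.injEq]
  exact ⟨trivial, by omega⟩
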